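-- pv_equiv track=rewrite | github.com/Niclas-J-M/BP | utils/grid_generation.py | create_regions
-- ===== SOURCE A (Python) =====
-- import math
--
-- def create_regions(size, num_regions):
--     # Check if num_regions is a perfect square
--     if int(math.sqrt(num_regions)) ** 2 != num_regions:
--         raise ValueError("Number of regions must be a perfect square.")
--
--     rows = cols = int(math.sqrt(num_regions))
--     step_x = size // cols
--     step_y = size // rows
--
--     REGION_BOUND = {}
--     id = 1
--     for row in range(rows):
--         for col in range(cols):
--             # Calculate top-left and bottom-right corners of each region
--             start_x = col * step_x
--             start_y = row * step_y
--             end_x = start_x + step_x - 1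
--             end_y = start_y + step_y - 1
--
--             # If on the last column or last row, adjust to fit exactly to size
--             if col == cols - 1:
--                 end_x = size - 1
--             if row == rows - 1:
--                 end_y = size - 1
--
--             REGION_BOUND[id] = ((start_x, start_y), (end_x, end_y))
--             id += 1
--     return REGION_BOUND
-- ===== SOURCE B (Python) =====
-- import math
--
-- def create_regions(size, num_regions):
--     k = int(math.sqrt(num_regions))
--     if k * k != num_regions:
--         raise ValueError("Number of regions must be a perfect square.")
--     step = size // k                 # k == 0 raises ZeroDivisionError, as in A
--     rem = size - k * step            # remainder absorbed by the last row/column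
--     # one flat pass over region ids; (row, col) recovered by divmod,
--     # boundary fit expressed as branch-free arithmetic on the remainder
--     return {id: (((id - 1) % k * step, (id - 1) // k * step),
--                  ((id - 1) % k * step + step - 1 + ((id - 1) % k == k - 1) * rem,
--                   (id - 1) // k * step + step - 1 + ((id - 1) // k == k - 1) * rem))
--             for id in range(1, k * k + 1)}
-- ===== Notes on version B (the rewrite author's own statement) =====
-- stated objective: alternative
-- what changed: B replaces A's nested row/col loops with two boundary branches by a single flat pass over region ids, recovering (row, col) with divmod and folding the last-row/last-column fit into branch-free remainder arithmetic.
import Mathlib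
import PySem

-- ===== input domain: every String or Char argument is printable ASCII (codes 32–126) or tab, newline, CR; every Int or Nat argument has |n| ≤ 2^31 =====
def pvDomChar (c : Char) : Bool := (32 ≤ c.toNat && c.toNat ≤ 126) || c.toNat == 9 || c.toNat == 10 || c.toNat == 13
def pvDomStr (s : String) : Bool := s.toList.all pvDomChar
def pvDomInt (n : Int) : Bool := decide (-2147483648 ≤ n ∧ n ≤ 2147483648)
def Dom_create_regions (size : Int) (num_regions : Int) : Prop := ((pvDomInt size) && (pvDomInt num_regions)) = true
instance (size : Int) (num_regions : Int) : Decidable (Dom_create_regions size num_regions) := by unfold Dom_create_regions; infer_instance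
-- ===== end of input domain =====

-- B replaces A's nested row/col loops and two boundary branches by one flat pass over region
-- ids, recovering (row, col) with divmod and branch-free remainder arithmetic (alternative
-- decomposition, same cost).


-- ===== PORT A =====
def create_regions (size : Int) (num_regions : Int) : List (Int × (Int × Int) × (Int × Int)) :=
  -- int(math.sqrt(num_regions)) = Nat.sqrt: exact for 0 ≤ num_regions ≤ 2^31 (IEEE sqrt is
  -- correctly rounded and such values are exact doubles); num_regions < 0 raises ValueError.
  let k : Int := (Nat.sqrt num_regions.toNat : Int)
  if k ^ 2 ≠ num_regions then []        -- raise ValueError (outside Pre_)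
  else if k = 0 then []                 -- size // 0 raises ZeroDivisionError (outside Pre_)
  else
    let rows := k
    let cols := k
    let step_x := PySem.Int.floordiv size cols
    let step_y := PySem.Int.floordiv size rows
    -- dict keyed by fresh increasing ints: insertion-order assoc list, each write appends
    ((PySem.List.pyRange 0 rows 1).foldl
      (fun (st : List (Int × (Int × Int) × (Int × Int)) × Int) row =>
        (PySem.List.pyRange 0 cols 1).foldl
          (fun st col =>
            let start_x := col * step_x
            let start_y := row * step_y
            let end_x := start_x + step_x - 1
            let end_y := start_y + step_y - 1
            let end_x := if col = cols - 1 then size - 1 else end_x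
            let end_y := if row = rows - 1 then size - 1 else end_y
            (st.1 ++ [(st.2, (start_x, start_y), (end_x, end_y))], st.2 + 1))
          st)
      ([], 1)).1

-- ===== PORT B =====
def create_regions_alt (size : Int) (num_regions : Int) : List (Int × (Int × Int) × (Int × Int)) :=
  let k : Int := (Nat.sqrt num_regions.toNat : Int)   -- int(math.sqrt(num_regions)), as in port A
  if k * k ≠ num_regions then []        -- raise ValueError (outside Pre_)
  else if k = 0 then []                 -- size // 0 raises ZeroDivisionError (outside Pre_)
  else
    let step := PySem.Int.floordiv size k
    let rem := size - k * step
    -- dict comprehension over range(1, k*k+1): assoc list in id order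
    (PySem.List.pyRange 1 (k * k + 1) 1).map (fun id =>
      (id, (PySem.Int.mod (id - 1) k * step, PySem.Int.floordiv (id - 1) k * step),
       (PySem.Int.mod (id - 1) k * step + step - 1
          + (if PySem.Int.mod (id - 1) k = k - 1 then 1 else 0) * rem,
        PySem.Int.floordiv (id - 1) k * step + step - 1
          + (if PySem.Int.floordiv (id - 1) k = k - 1 then 1 else 0) * rem)))

-- ===== PRECONDITION & SPEC =====
-- Pre_ excludes EXACTLY the inputs where A raises (it returns on all others): num_regions < 0
-- (math.sqrt ValueError), positive non-perfect-square num_regions (the explicit ValueError), and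
-- num_regions = 0, where the perfect-square check passes but 'size // cols' with cols = 0 raises
-- ZeroDivisionError.  B raises the same exceptions on the same inputs.
-- kernel-computable floor square root (bisection on [lo, hi), 64 fuel steps suffice for |n| ≤ 2^31)
def pvISqrtGo (m : Nat) : Nat → Nat → Nat → Nat
  | 0, lo, _ => lo
  | f+1, lo, hi =>
      if hi ≤ lo + 1 then lo
      else
        let mid := (lo + hi) / 2
        if mid * mid ≤ m then pvISqrtGo m f mid hi else pvISqrtGo m f lo mid
def pvISqrt (m : Nat) : Nat := pvISqrtGo m 64 0 (m + 1)
def Pre_create_regions (size : Int) (num_regions : Int) : Prop :=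
  1 ≤ num_regions ∧ pvISqrt num_regions.toNat * pvISqrt num_regions.toNat = num_regions.toNat
instance (size : Int) (num_regions : Int) : Decidable (Pre_create_regions size num_regions) := by
  unfold Pre_create_regions; infer_instance
def pvWitness_create_regions : Int × Int := (10, 4)
def Spec_create_regions (size : Int) (num_regions : Int) (out : List (Int × (Int × Int) × (Int × Int))) : Prop := out = create_regions_alt size num_regions
instance (size : Int) (num_regions : Int) (out : List (Int × (Int × Int) × (Int × Int))) : Decidable (Spec_create_regions size num_regions out) := by unfold Spec_create_regions; infer_instance

-- ===== CLAIM (what is proved, stated in full; the proofs are below) =====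
def Claim_equal_create_regions : Prop := ∀ (size : Int) (num_regions : Int), Dom_create_regions size num_regions → Pre_create_regions size num_regions → Spec_create_regions size num_regions (create_regions size num_regions)

-- ===== LEMMAS AND PROOFS =====

lemma getElem_enumerate {α : Type} (l : List α) (s : Int) (i : Nat) (h : i < l.length) :
    (PySem.List.enumerate l s)[i]'(by simpa [PySem.List.length_enumerate]) = (s + i, l[i]) := by
  induction l generalizing s i with
  | nil => simp at h
  | cons x xs ih =>
    cases i with
    | zero => simp [PySem.List.enumerate_cons]
    | succ j =>
      simp only [PySem.List.enumerate_cons, List.getElem_cons_succ]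
      rw [ih _ _ (by simpa using h)]
      push_cast
      ring_nf

-- on range(0, b) the enumeration index equals the value
lemma enumerate_pyRange (b s : Int) :
    PySem.List.enumerate (PySem.List.pyRange 0 b 1) s
      = (PySem.List.pyRange 0 b 1).map (fun c => (s + c, c)) := by
  apply List.ext_getElem
  · simp [PySem.List.length_enumerate]
  · intro i h1 h2
    rw [getElem_enumerate _ _ _ (by simpa [PySem.List.length_enumerate] using h1)]
    simp [PySem.List.getElem_pyRange_one]

lemma enumerate_range (n : Nat) (s : Int) :
    PySem.List.enumerate (List.range n) s = (List.range n).map (fun (j : Nat) => (s + (j:Int), j)) := by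
  apply List.ext_getElem
  · simp [PySem.List.length_enumerate]
  · intro i h1 h2
    rw [getElem_enumerate _ _ _ (by simpa [PySem.List.length_enumerate] using h1)]
    simp

-- inner loop of A: append one keyed cell per element, key increments
lemma foldl_emit {α : Type} (f : Int → α) (l : List Int)
    (p : List (Int × α) × Int) :
    l.foldl (fun st x => (st.1 ++ [(st.2, f x)], st.2 + 1)) p
      = (p.1 ++ (PySem.List.enumerate l p.2).map (fun q => (q.1, f q.2)), p.2 + l.length) := by
  induction l generalizing p with
  | nil => simp [PySem.List.enumerate_nil]
  | cons x xs ih => simp [PySem.List.enumerate_cons, ih]; ring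

lemma enumerate_map {α β : Type} (f : α → β) (l : List α) (s : Int) :
    PySem.List.enumerate (l.map f) s = (PySem.List.enumerate l s).map (fun p => (p.1, f p.2)) := by
  induction l generalizing s with
  | nil => simp [PySem.List.enumerate_nil]
  | cons x xs ih => simp [PySem.List.enumerate_cons, ih]

lemma enumerate_shift {α : Type} (l : List α) (s : Int) :
    PySem.List.enumerate l (s + 1) = (PySem.List.enumerate l s).map (fun p => (p.1 + 1, p.2)) := by
  induction l generalizing s with
  | nil => simp [PySem.List.enumerate_nil]
  | cons x xs ih => simp [PySem.List.enumerate_cons, ih]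

-- outer loop of A: each element appends a block of nn keyed cells, key advances by nn
lemma foldl_emit_block {α : Type} (F : Int → Nat → α) (nn : Nat) (l : List Int)
    (p : List (Int × α) × Int) :
    l.foldl (fun st x => (st.1 ++ (List.range nn).map (fun (c : Nat) => (st.2 + (c:Int), F x c)), st.2 + (nn:Int))) p
      = (p.1 ++ (PySem.List.enumerate l 0).flatMap (fun q =>
          (List.range nn).map (fun (c : Nat) => (p.2 + q.1 * nn + (c:Int), F q.2 c))),
         p.2 + l.length * nn) := by
  induction l generalizing p with
  | nil => simp [PySem.List.enumerate_nil]
  | cons x xs ih =>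
    rw [List.foldl_cons, ih]
    rw [PySem.List.enumerate_cons, show (0:Int) + 1 = 0 + 1 from rfl, enumerate_shift]
    simp only [List.flatMap_cons, List.flatMap_map, Prod.mk.injEq]
    have e1 : (fun (a : Int × Int) => (List.range nn).map (fun (c : Nat) => (p.2 + (a.1 + 1) * nn + (c:Int), F a.2 c)))
        = (fun a => (List.range nn).map (fun (c : Nat) => (p.2 + (nn:Int) + a.1 * nn + (c:Int), F a.2 c))) := by
      funext a
      apply List.map_congr_left
      intro c _
      have : p.2 + (a.1 + 1) * (nn:Int) + (c:Int) = p.2 + (nn:Int) + a.1 * nn + (c:Int) := by ring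
      rw [this]
    have e2 : (List.range nn).map (fun (c : Nat) => (p.2 + 0 * (nn:Int) + (c:Int), F x c))
        = (List.range nn).map (fun (c : Nat) => (p.2 + (c:Int), F x c)) := by
      apply List.map_congr_left
      intro c _
      have : p.2 + 0 * (nn:Int) + (c:Int) = p.2 + (c:Int) := by ring
      rw [this]
    rw [e1, e2]
    constructor
    · simp [List.append_assoc]
    · simp only [List.length_cons]; push_cast; ring

-- range(m*n) split into m consecutive blocks of n
lemma range_mul_flatMap (m n : Nat) :
    List.range (m * n) = (List.range m).flatMap (fun i => (List.range n).map (fun j => n * i + j)) := by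
  induction m with
  | zero => simp
  | succ m ih =>
    rw [Nat.succ_mul, List.range_add, ih, List.range_succ, List.flatMap_append]
    simp [Nat.mul_comm]

-- ===== VERDICT (by name: the statement is the Claim_ definition above) =====
theorem create_regions_spec : Claim_equal_create_regions := by
  intro size nr _hdom hpre
  obtain ⟨h1, hkk⟩ := hpre
  have hs : Nat.sqrt nr.toNat = pvISqrt nr.toNat := by
    conv_lhs => rw [← hkk]
    exact Nat.sqrt_eq _
  have h2 : Nat.sqrt nr.toNat * Nat.sqrt nr.toNat = nr.toNat := by rw [hs, hkk]
  unfold Spec_create_regions create_regions create_regions_alt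
  set n := Nat.sqrt nr.toNat with hn
  have htn : ((nr.toNat : Int)) = nr := Int.toNat_of_nonneg (by omega)
  have hk2 : ((n:Int)) * n = nr := by rw [← htn]; exact_mod_cast h2
  have hn1 : 1 ≤ n := by
    rcases Nat.eq_zero_or_pos n with h0 | h0
    · exfalso; rw [h0] at hk2; simp at hk2; omega
    · exact h0
  have hkne : ((n:Int)) ≠ 0 := by exact_mod_cast Nat.one_le_iff_ne_zero.mp hn1
  have hpow : ((n:Int)) ^ 2 = nr := by rw [pow_two]; exact hk2
  simp only [hpow, hk2, hkne, ne_eq, not_true_eq_false, if_false]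
  have hR : PySem.List.pyRange 0 (n:Int) 1 = (List.range n).map (fun (j:Nat) => (j:Int)) := by
    rw [PySem.List.pyRange_one]; simp
  -- A: collapse the two loops into one flatMap of keyed cells
  simp only [foldl_emit]
  simp only [enumerate_pyRange, List.map_map,
    PySem.List.length_pyRange_one, sub_zero, Int.toNat_natCast]
  rw [hR]
  simp only [List.map_map, Function.comp_def]
  simp only [foldl_emit_block, List.nil_append]
  simp only [enumerate_map, enumerate_range, List.flatMap_map, List.map_map, Function.comp_def]
  -- B: range(1, n*n+1) split into n blocks of n via divmod
  rw [PySem.List.pyRange_one]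
  have hL : (nr + 1 - 1).toNat = n * n := by
    rw [show nr + 1 - 1 = ((n * n : Nat) : Int) by rw [← hk2]; push_cast; ring, Int.toNat_natCast]
  rw [hL, range_mul_flatMap]
  simp only [List.map_flatMap, List.map_map, Function.comp_def]
  apply List.flatMap_congr
  intro i hi
  apply List.map_congr_left
  intro j hj
  have hilt := List.mem_range.mp hi
  have hjlt := List.mem_range.mp hj
  have hid : (1:Int) + ((n * i + j : Nat) : Int) - 1 = ((n * i + j : Nat) : Int) := by ring
  have hdiv : PySem.Int.floordiv ((n * i + j : Nat) : Int) ((n:Nat):Int) = ((i:Nat):Int) := by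
    rw [PySem.Int.floordiv_natCast]
    congr 1
    rw [Nat.mul_add_div (by omega), Nat.div_eq_of_lt hjlt]
    omega
  have hmod : PySem.Int.mod ((n * i + j : Nat) : Int) ((n:Nat):Int) = ((j:Nat):Int) := by
    rw [PySem.Int.mod_natCast]
    congr 1
    rw [Nat.mul_add_mod, Nat.mod_eq_of_lt hjlt]
  simp only [hid, hdiv, hmod]
  set step := PySem.Int.floordiv size (n:Int) with hstep
  refine Prod.ext ?_ (Prod.ext (Prod.ext ?_ ?_) (Prod.ext ?_ ?_))
  · push_cast; ring
  · ring
  · ring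
  · by_cases hj1 : (j:Int) = (n:Int) - 1
    · simp only [hj1, if_true]; ring
    · rw [if_neg hj1, if_neg hj1]; ring
  · by_cases hi1 : (i:Int) = (n:Int) - 1
    · simp only [hi1, if_true]; ring
    · rw [if_neg hi1, if_neg hi1]; ring
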